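-- pv_equiv track=rewrite | github.com/cyc19950621/python | .history/EMR/apriori_20190422135526.py | generateC1
-- ===== SOURCE A (Python) =====
-- def generateC1(dataSet):
--     C1 = []  # 用于存放生成的单个物品的项集列表
--     # 遍历数据集
--     for data in dataSet:
--         for item in data:
--             if [item] not in C1:
--                 C1.append([item])
--     C1.sort()
--     return C1
-- ===== SOURCE B (Python) =====
-- def generateC1(dataSet):
--     flat = []
--     for data in dataSet:
--         for item in data:
--             flat.append(item)
--     flat.sort()
--     result = []
--     prev = None
--     for item in flat:
--         if prev is None or item != prev:
--             result.append([item])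
--             prev = item
--     return result
-- ===== Notes on version B (the rewrite author's own statement) =====
-- stated objective: faster
-- what changed: Replaces the per-item '[item] not in C1' linear membership scan (quadratic dedup) by flattening all items, sorting once, and deduplicating adjacent equal items in one linear pass.
import Mathlib
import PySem

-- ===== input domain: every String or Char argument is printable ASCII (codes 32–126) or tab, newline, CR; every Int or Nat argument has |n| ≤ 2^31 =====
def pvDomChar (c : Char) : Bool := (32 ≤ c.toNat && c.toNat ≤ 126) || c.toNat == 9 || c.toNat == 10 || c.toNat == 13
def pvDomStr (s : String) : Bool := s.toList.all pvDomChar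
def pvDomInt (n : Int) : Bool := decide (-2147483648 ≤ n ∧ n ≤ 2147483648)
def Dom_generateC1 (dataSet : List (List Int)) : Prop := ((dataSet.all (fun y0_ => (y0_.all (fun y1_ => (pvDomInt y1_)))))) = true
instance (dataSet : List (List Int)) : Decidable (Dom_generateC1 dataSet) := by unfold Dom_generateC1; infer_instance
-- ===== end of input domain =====

-- B replaces A's quadratic per-item membership scan by flatten + one sort + one
-- adjacent-dedup pass (objective: faster).


-- ===== PORT A =====
def generateC1 (dataSet : List (List Int)) : List (List Int) :=
  let C1 := dataSet.foldl (fun C1 data =>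
      data.foldl (fun C1 item => if [item] ∈ C1 then C1 else C1 ++ [[item]]) C1) []
  -- Python's list-of-lists sort: lexicographic order = Mathlib's linear order on List Int
  @PySem.List.sorted (List Int) (List Int) List.instLinearOrder.toLT LinearOrder.toDecidableLT C1 (fun x => x) false

-- ===== PORT B =====
def generateC1_alt (dataSet : List (List Int)) : List (List Int) :=
  let flat := dataSet.foldl (fun flat data =>
      data.foldl (fun flat item => flat ++ [item]) flat) []
  let s := PySem.List.sorted flat (fun x => x) false
  (s.foldl (fun (st : List (List Int) × Option Int) item =>
      if st.2 = none ∨ st.2 ≠ some item then (st.1 ++ [[item]], some item) else st)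
    ([], none)).1

-- ===== PRECONDITION & SPEC =====
def Spec_generateC1 (dataSet : List (List Int)) (out : List (List Int)) : Prop := out = generateC1_alt dataSet
instance (dataSet : List (List Int)) (out : List (List Int)) : Decidable (Spec_generateC1 dataSet out) := by unfold Spec_generateC1; infer_instance

-- ===== CLAIM (what is proved, stated in full; the proofs are below) =====
def Claim_equal_generateC1 : Prop := ∀ (dataSet : List (List Int)), Dom_generateC1 dataSet → Spec_generateC1 dataSet (generateC1 dataSet)

-- ===== LEMMAS AND PROOFS =====

-- the int-level step of A's dedup loop
def pvIntStep (ys : List Int) (item : Int) : List Int :=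
  if item ∈ ys then ys else ys ++ [item]

-- adjacent-dedup of B's scan, as a structural recursion on the sorted list
def pvAdj : Option Int → List Int → List Int
  | _, [] => []
  | none, x :: xs => x :: pvAdj (some x) xs
  | some p, x :: xs => if x = p then pvAdj (some p) xs else x :: pvAdj (some x) xs

theorem singleton_lt_singleton (a b : Int) : (([a] : List Int) < [b]) ↔ a < b := by
  constructor
  · intro h; cases h with
    | rel h => exact h
    | cons h => cases h
  · intro h; exact List.Lex.rel h

theorem mem_map_singleton (a : Int) (ys : List Int) :
    ([a] ∈ ys.map (fun x => [x])) ↔ a ∈ ys := by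
  simp

-- B's flat-building loops compute acc ++ flatten
theorem flat_inner (data : List Int) (acc : List Int) :
    data.foldl (fun flat item => flat ++ [item]) acc = acc ++ data := by
  induction data generalizing acc with
  | nil => simp
  | cons x xs ih => simp [List.foldl_cons, ih]

theorem flat_outer (l : List (List Int)) (acc : List Int) :
    l.foldl (fun flat data => data.foldl (fun flat item => flat ++ [item]) flat) acc
      = acc ++ l.flatten := by
  induction l generalizing acc with
  | nil => simp
  | cons d ds ih => rw [List.foldl_cons, flat_inner, ih, List.flatten_cons, List.append_assoc]

-- A's inner loop is the int-level dedup loop, mapped through singletons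
theorem a_inner (data : List Int) (ys : List Int) :
    data.foldl (fun C1 item => if [item] ∈ C1 then C1 else C1 ++ [[item]])
        (ys.map (fun x => [x]))
      = (data.foldl pvIntStep ys).map (fun x => [x]) := by
  induction data generalizing ys with
  | nil => rfl
  | cons x xs ih =>
    simp only [List.foldl_cons, pvIntStep]
    by_cases h : x ∈ ys
    · simp [h, mem_map_singleton, ih]
    · have hnm : ¬ ([x] ∈ ys.map (fun x => [x])) := by simp [mem_map_singleton, h]
      rw [if_neg h, if_neg hnm,
        show (ys.map (fun x => [x]) ++ [[x]]) = (ys ++ [x]).map (fun x => [x]) by simp, ih]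

theorem a_outer (l : List (List Int)) (ys : List Int) :
    l.foldl (fun C1 data =>
        data.foldl (fun C1 item => if [item] ∈ C1 then C1 else C1 ++ [[item]]) C1)
        (ys.map (fun x => [x]))
      = (l.foldl (fun ys data => data.foldl pvIntStep ys) ys).map (fun x => [x]) := by
  induction l generalizing ys with
  | nil => rfl
  | cons d ds ih => simp only [List.foldl_cons, a_inner, ih]

theorem intStep_mem (data : List Int) (ys : List Int) (x : Int) :
    x ∈ data.foldl pvIntStep ys ↔ x ∈ ys ∨ x ∈ data := by
  induction data generalizing ys with
  | nil => simp
  | cons a as ih =>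
    simp only [List.foldl_cons, pvIntStep]
    by_cases h : a ∈ ys
    · rw [if_pos h, ih]
      simp only [List.mem_cons]
      constructor
      · tauto
      · rintro (h1 | rfl | h2)
        · exact Or.inl h1
        · exact Or.inl h
        · exact Or.inr h2
    · rw [if_neg h, ih]
      simp only [List.mem_append, List.mem_cons]
      tauto

theorem intStep_nodup (data : List Int) (ys : List Int) (h : ys.Nodup) :
    (data.foldl pvIntStep ys).Nodup := by
  induction data generalizing ys with
  | nil => exact h
  | cons a as ih =>
    simp only [List.foldl_cons, pvIntStep]
    by_cases ha : a ∈ ys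
    · simp only [ha, if_pos]; exact ih ys h
    · simp only [ha, if_neg, not_false_iff]
      refine ih _ ?_
      have hne : ∀ b ∈ ys, ¬ b = a := fun b hb e => ha (e ▸ hb)
      simp [List.nodup_append, h]
      exact hne

theorem a_acc_mem (l : List (List Int)) (ys : List Int) (x : Int) :
    x ∈ l.foldl (fun ys data => data.foldl pvIntStep ys) ys ↔ x ∈ ys ∨ x ∈ l.flatten := by
  induction l generalizing ys with
  | nil => simp
  | cons d ds ih => simp [List.foldl_cons, ih, intStep_mem]; tauto

theorem a_acc_nodup (l : List (List Int)) (ys : List Int) (h : ys.Nodup) :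
    (l.foldl (fun ys data => data.foldl pvIntStep ys) ys).Nodup := by
  induction l generalizing ys with
  | nil => exact h
  | cons d ds ih => exact ih _ (intStep_nodup d ys h)

-- B's scan loop, characterised by pvAdj
theorem b_fold_adj (s : List Int) (res : List (List Int)) (prev : Option Int) :
    (s.foldl (fun (st : List (List Int) × Option Int) item =>
        if st.2 = none ∨ st.2 ≠ some item then (st.1 ++ [[item]], some item) else st)
      (res, prev)).1 = res ++ (pvAdj prev s).map (fun x => [x]) := by
  induction s generalizing res prev with
  | nil => simp [pvAdj]
  | cons x xs ih =>
    cases prev with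
    | none => simp [List.foldl_cons, pvAdj, ih]
    | some p =>
      by_cases h : x = p
      · subst h; simp [List.foldl_cons, pvAdj, ih]
      · have hpx : ¬ p = x := fun e => h e.symm
        simp [List.foldl_cons, pvAdj, h, hpx, ih]

theorem adj_some (s : List Int) (p : Int) (hp : ∀ y ∈ s, p ≤ y)
    (hs : s.Pairwise (· ≤ ·)) :
    (pvAdj (some p) s).Pairwise (· < ·) ∧
      (∀ x, x ∈ pvAdj (some p) s ↔ x ∈ s ∧ x ≠ p) := by
  induction s generalizing p with
  | nil => simp [pvAdj]
  | cons x xs ih =>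
    have hx : p ≤ x := hp x (by simp)
    have hxs : ∀ y ∈ xs, x ≤ y := fun y hy => (List.pairwise_cons.mp hs).1 y hy
    have hs' := (List.pairwise_cons.mp hs).2
    by_cases h : x = p
    · subst h
      have := ih x hxs hs'
      simpa [pvAdj] using ⟨this.1, fun z =>
        ⟨fun hz => ⟨Or.inr ((this.2 z).mp hz).1, ((this.2 z).mp hz).2⟩,
         fun ⟨hz1, hz2⟩ => (this.2 z).mpr ⟨hz1.resolve_left hz2, hz2⟩⟩⟩
    · have hpx : p < x := lt_of_le_of_ne hx (fun e => h e.symm)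
      have := ih x hxs hs'
      constructor
      · simp only [pvAdj, if_neg h, List.pairwise_cons]
        refine ⟨fun z hz => ?_, this.1⟩
        have hz' := (this.2 z).mp hz
        exact lt_of_le_of_ne (hxs z hz'.1) (Ne.symm hz'.2)
      · intro z
        simp only [pvAdj, if_neg h, List.mem_cons]
        constructor
        · rintro (rfl | hz)
          · exact ⟨Or.inl rfl, fun e => h e⟩
          · have hz' := (this.2 z).mp hz
            exact ⟨Or.inr hz'.1, fun e => absurd (e ▸ hpx) (not_lt.mpr (hxs z hz'.1))⟩
        · rintro ⟨(rfl | hz), hzp⟩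
          · exact Or.inl rfl
          · by_cases hzx : z = x
            · exact Or.inl hzx
            · exact Or.inr ((this.2 z).mpr ⟨hz, hzx⟩)

theorem adj_none (s : List Int) (hs : s.Pairwise (· ≤ ·)) :
    (pvAdj none s).Pairwise (· < ·) ∧ (∀ x, x ∈ pvAdj none s ↔ x ∈ s) := by
  cases s with
  | nil => simp [pvAdj]
  | cons x xs =>
    have hxs : ∀ y ∈ xs, x ≤ y := fun y hy => (List.pairwise_cons.mp hs).1 y hy
    have hs' := (List.pairwise_cons.mp hs).2
    have h := adj_some xs x hxs hs'
    constructor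
    · simp only [pvAdj, List.pairwise_cons]
      refine ⟨fun z hz => ?_, h.1⟩
      have hz' := (h.2 z).mp hz
      exact lt_of_le_of_ne (hxs z hz'.1) (Ne.symm hz'.2)
    · intro z
      simp only [pvAdj, List.mem_cons]
      constructor
      · rintro (rfl | hz)
        · exact Or.inl rfl
        · exact Or.inr ((h.2 z).mp hz).1
      · rintro (rfl | hz)
        · exact Or.inl rfl
        · by_cases hzx : z = x
          · exact Or.inl hzx
          · exact Or.inr ((h.2 z).mpr ⟨hz, hzx⟩)

-- ===== VERDICT (by name: the statement is the Claim_ definition above) =====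
theorem generateC1_spec : Claim_equal_generateC1 := by
  intro dataSet _
  unfold Spec_generateC1 generateC1 generateC1_alt
  -- name the pieces
  have hflat := flat_outer dataSet []
  simp only [List.nil_append] at hflat
  rw [hflat]
  set L := dataSet.flatten with hL
  set s := PySem.List.sorted L (fun x => x) false with hs
  -- A's accumulator
  have hA : dataSet.foldl (fun C1 data =>
      data.foldl (fun C1 item => if [item] ∈ C1 then C1 else C1 ++ [[item]]) C1) []
      = (dataSet.foldl (fun ys data => data.foldl pvIntStep ys) []).map (fun x => [x]) := by
    have := a_outer dataSet []
    simpa using this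
  rw [hA]
  set A0 := dataSet.foldl (fun ys data => data.foldl pvIntStep ys) [] with hA0
  -- B's result
  rw [b_fold_adj s [] none]
  simp only [List.nil_append]
  -- sortedness facts
  have hsp : s.Pairwise (· ≤ ·) := by
    have := PySem.List.sorted_pairwise L (fun x => x)
    simpa [hs] using this
  have hmem_s : ∀ x, x ∈ s ↔ x ∈ L := by
    intro x; rw [hs]; exact PySem.List.mem_sorted L (fun x => x) false x
  obtain ⟨hadj_pw, hadj_mem⟩ := adj_none s hsp
  -- permutation between pvAdj none s and A0
  have hA0_nodup : A0.Nodup := a_acc_nodup dataSet [] (by simp)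
  have hadj_nodup : (pvAdj none s).Nodup :=
    hadj_pw.imp (fun h => ne_of_lt h)
  have hperm : (pvAdj none s).Perm A0 := by
    refine (List.perm_ext_iff_of_nodup hadj_nodup hA0_nodup).mpr ?_
    intro a
    rw [hadj_mem a, hmem_s a, hA0, a_acc_mem dataSet [] a]
    simp only [List.not_mem_nil, false_or]
    exact Iff.rfl
  -- conclude via the characterisation of sorted
  refine PySem.List.sorted_eq_of_perm_of_pairwise_lt _ _ (fun x => x)
    (hperm.map (fun x => [x])) ?_
  rw [List.pairwise_map]
  exact hadj_pw.imp (fun h => (singleton_lt_singleton _ _).mpr h)
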